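-- pv_equiv track=rewrite | github.com/9nightss/KOD8_ENC | kod8_engine.py | op_keystream_xor
-- ===== SOURCE A (Python) =====
-- KOD8_KEY      = "86247931"
--
-- def op_keystream_xor(text: str, encrypt: bool, **_) -> str:
--     """
--     KEY STREAM XOR  (self-inverse)
--     ------------------------------
--     Encrypt = Decrypt: generates a pseudo-random byte stream from KOD8_KEY
--     using a Linear Congruential Generator (LCG), then XORs each character
--     with the next byte of the stream.
--
--         seed  = int(KOD8_KEY)  = 86247931
--         seed  = (seed × 1103515245 + 12345) mod 2^31   ← LCG step
--         byte  = seed mod 256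
--         out_i = chr(ord(in_i) ^ byte_i)
--
--     The PRNG is deterministic — same key always produces the same stream,
--     so the XOR is self-inverse.
--
--     Why it's here: every position gets a UNIQUE XOR byte, destroying long
--     repeating patterns (e.g. video frame data).  Safe anywhere in chain.
--     """
--     seed, result = int(KOD8_KEY), []
--     for c in text:
--         seed = (seed * 1103515245 + 12345) & 0x7FFFFFFF
--         if ord(c) > 255:   # skip high-codepoint chars unchanged
--             result.append(c)
--         else:
--             result.append(chr(ord(c) ^ (seed % 256)))
--     return "".join(result)
-- ===== SOURCE B (Python) =====
-- KOD8_KEY = "86247931"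
--
-- _A, _C, _M = 1103515245, 12345, 1 << 31
--
-- def _seed_at(n: int) -> int:
--     # Closed-form LCG jump: seed_n = (A^n*s0 + C*(A^n-1)/(A-1)) mod M.
--     # The geometric sum mod M is recovered by exponentiating mod M*(A-1).
--     t = pow(_A, n, _M * (_A - 1))
--     geo = ((t - 1) // (_A - 1)) % _M
--     return (pow(_A, n, _M) * int(KOD8_KEY) + _C * geo) % _M
--
-- def op_keystream_xor(text: str, encrypt: bool, **_) -> str:
--     return "".join(
--         c if ord(c) > 255 else chr(ord(c) ^ (_seed_at(i + 1) % 256))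
--         for i, c in enumerate(text)
--     )
-- ===== Notes on version B (the rewrite author's own statement) =====
-- stated objective: alternative
-- what changed: A iterates the LCG recurrence once per character in a single fused loop; B computes each position's keystream byte independently by the closed-form LCG jump-ahead seed_n = (A^n*s0 + C*(A^n-1)/(A-1)) mod 2^31, using modular exponentiation (pow with modulus M*(A-1) to recover the geometric sum), so no seed state is carried across characters.
import Mathlib
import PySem

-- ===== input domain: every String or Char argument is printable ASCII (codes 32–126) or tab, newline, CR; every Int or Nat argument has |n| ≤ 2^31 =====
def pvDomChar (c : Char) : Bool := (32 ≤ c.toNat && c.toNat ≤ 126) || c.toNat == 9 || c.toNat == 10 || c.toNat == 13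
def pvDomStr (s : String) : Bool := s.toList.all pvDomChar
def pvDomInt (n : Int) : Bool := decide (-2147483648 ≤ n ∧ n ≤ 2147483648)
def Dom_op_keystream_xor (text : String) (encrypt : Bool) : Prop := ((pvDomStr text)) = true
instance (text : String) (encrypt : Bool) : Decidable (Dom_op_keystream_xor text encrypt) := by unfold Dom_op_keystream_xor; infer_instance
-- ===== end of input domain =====

-- B replaces A's iterated LCG with the closed-form jump-ahead seed_n = (A^n*s0 + C*(A^n-1)/(A-1)) mod 2^31 computed per index by modular exponentiation (alternative algorithm, not faster).


-- ===== PORT A =====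
-- A: one fused loop: advance the seed, then XOR (or skip) the current char, appending to `result`.
-- Python's `& 0x7FFFFFFF` on a nonnegative int is `% 2^31`, exact here (the seed stays nonnegative).
def pvStepA (st : Nat × List Char) (c : Char) : Nat × List Char :=
  let seed := (st.1 * 1103515245 + 12345) % 2147483648
  if c.toNat > 255 then (seed, st.2 ++ [c])
  else (seed, st.2 ++ [Char.ofNat (c.toNat ^^^ (seed % 256))])

def op_keystream_xor (text : String) (encrypt : Bool) : String :=
  let st := text.toList.foldl pvStepA ((86247931 : Nat), ([] : List Char))
  String.mk st.2

-- ===== PORT B =====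
-- B helper `_seed_at`: closed-form LCG jump; Python's pow(b, e, m) is PySem.Int.powMod.
def pvSeedAt (n : Int) : Int :=
  let t := PySem.Int.powMod 1103515245 n.toNat (2147483648 * 1103515244)
  let geo := PySem.Int.mod (PySem.Int.floordiv (t - 1) 1103515244) 2147483648
  PySem.Int.mod (PySem.Int.powMod 1103515245 n.toNat 2147483648 * 86247931 + 12345 * geo) 2147483648

def op_keystream_xor_alt (text : String) (encrypt : Bool) : String :=
  String.mk ((PySem.List.enumerate text.toList).map (fun p =>
    if p.2.toNat > 255 then p.2
    else Char.ofNat (p.2.toNat ^^^ (PySem.Int.mod (pvSeedAt (p.1 + 1)) 256).toNat)))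

-- ===== PRECONDITION & SPEC =====
def Spec_op_keystream_xor (text : String) (encrypt : Bool) (out : String) : Prop := out = op_keystream_xor_alt text encrypt
instance (text : String) (encrypt : Bool) (out : String) : Decidable (Spec_op_keystream_xor text encrypt out) := by unfold Spec_op_keystream_xor; infer_instance

-- ===== CLAIM (what is proved, stated in full; the proofs are below) =====
def Claim_equal_op_keystream_xor : Prop := ∀ (text : String) (encrypt : Bool), Dom_op_keystream_xor text encrypt → Spec_op_keystream_xor text encrypt (op_keystream_xor text encrypt)

-- ===== LEMMAS AND PROOFS =====

-- exact geometric sum 1 + a + ... + a^(n-1) for a = 1103515245, and the exact (unreduced) seed value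
def pvG : Nat → Nat
  | 0 => 0
  | n + 1 => 1103515245 * pvG n + 1

def pvE (n : Nat) : Nat := 1103515245 ^ n * 86247931 + 12345 * pvG n

theorem pvG_mul (n : Nat) : 1103515244 * pvG n + 1 = 1103515245 ^ n := by
  induction n with
  | zero => rfl
  | succ n ih => simp only [pvG]; rw [pow_succ', ← ih]; ring

theorem pv_resid_pos (n : Nat) : 1 ≤ 1103515245 ^ n % (2147483648 * 1103515244) := by
  have h2 := pvG_mul n
  have h1 := Nat.div_add_mod (1103515245 ^ n) (2147483648 * 1103515244)
  omega

theorem pv_geo (n : Nat) :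
    (1103515245 ^ n % (2147483648 * 1103515244) - 1) / 1103515244 % 2147483648
      = pvG n % 2147483648 := by
  have h2 := pvG_mul n
  have h1 := Nat.div_add_mod (1103515245 ^ n) (2147483648 * 1103515244)
  have h3 := Nat.mod_lt (1103515245 ^ n) (show 0 < 2147483648*1103515244 by norm_num)
  omega

theorem pv_powMod_eq (b : Int) (e : Nat) {m : Int} (hm : 0 < m) :
    PySem.Int.powMod b e m = b ^ e % m := by
  induction e with
  | zero => simp [PySem.Int.powMod, PySem.Int.mod_eq_emod_of_pos hm]
  | succ n ih => simp [PySem.Int.powMod, pow_succ, PySem.Int.mod_eq_emod_of_pos hm]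

theorem pv_powMod_nat (b m e : Nat) (hm : 0 < m) :
    PySem.Int.powMod (b : Int) e (m : Int) = ((b ^ e % m : Nat) : Int) := by
  rw [pv_powMod_eq _ _ (by exact_mod_cast hm)]
  push_cast
  rfl

theorem pv_pm1 (e : Nat) : PySem.Int.powMod 1103515245 e (2147483648 * 1103515244)
    = ((1103515245 ^ e % (2147483648 * 1103515244) : Nat) : Int) := by
  exact_mod_cast pv_powMod_nat 1103515245 (2147483648*1103515244) e (by norm_num)

theorem pv_pm2 (e : Nat) : PySem.Int.powMod 1103515245 e 2147483648
    = ((1103515245 ^ e % 2147483648 : Nat) : Int) := by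
  exact_mod_cast pv_powMod_nat 1103515245 2147483648 e (by norm_num)

theorem pv_cast_core (x y : Nat) (hx : 1 ≤ x) :
    PySem.Int.mod ((y:Int) * 86247931
        + 12345 * PySem.Int.mod (PySem.Int.floordiv ((x:Int) - 1) 1103515244) 2147483648) 2147483648
      = (((y * 86247931 + 12345 * ((x-1)/1103515244 % 2147483648)) % 2147483648 : Nat) : Int) := by
  rw [show ((x:Int) - 1) = ((x-1 : Nat):Int) by omega]
  rw [show ((y:Int) * 86247931
        + 12345 * PySem.Int.mod (PySem.Int.floordiv (((x-1:Nat)):Int) 1103515244) 2147483648)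
      = ((y * 86247931 + 12345 * ((x-1)/1103515244 % 2147483648) : Nat) : Int) by simp]
  simp

theorem pv_seedAt_nat (n : Nat) : pvSeedAt (n : Int) = ((pvE n % 2147483648 : Nat) : Int) := by
  simp only [pvSeedAt, Int.toNat_natCast, pv_pm1, pv_pm2]
  rw [pv_cast_core _ _ (pv_resid_pos n)]
  apply congrArg
  rw [pv_geo]
  exact ((Nat.mod_modEq (1103515245 ^ n) 2147483648).mul_right 86247931).add
    ((Nat.mod_modEq (pvG n) 2147483648).mul_left 12345)

theorem pv_byte (n : Nat) :
    (PySem.Int.mod (pvSeedAt ((n : Nat) : Int)) 256).toNat = pvE n % 2147483648 % 256 := by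
  rw [pv_seedAt_nat, PySem.Int.mod_eq_emod_of_pos (by norm_num)]
  omega

theorem pv_stepE (k : Nat) :
    (pvE k % 2147483648 * 1103515245 + 12345) % 2147483648 = pvE (k + 1) % 2147483648 := by
  have h : pvE (k + 1) = pvE k * 1103515245 + 12345 := by
    unfold pvE; simp only [pvG]; rw [pow_succ]; ring
  rw [h]
  exact ((Nat.mod_modEq (pvE k) 2147483648).mul_right 1103515245).add_right 12345

theorem pv_main (cs : List Char) : ∀ (k : Nat) (acc : List Char),
    (cs.foldl pvStepA (pvE k % 2147483648, acc)).2
      = acc ++ (PySem.List.enumerate cs (k : Int)).map (fun p =>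
          if p.2.toNat > 255 then p.2
          else Char.ofNat (p.2.toNat ^^^ (PySem.Int.mod (pvSeedAt (p.1 + 1)) 256).toNat)) := by
  induction cs with
  | nil => intro k acc; simp [PySem.List.enumerate]
  | cons c cs ih =>
    intro k acc
    rw [List.foldl_cons, PySem.List.enumerate_cons, List.map_cons]
    have hseed : pvStepA (pvE k % 2147483648, acc) c
        = (pvE (k+1) % 2147483648,
           acc ++ [if c.toNat > 255 then c
                   else Char.ofNat (c.toNat ^^^ pvE (k+1) % 2147483648 % 256)]) := by
      simp only [pvStepA, pv_stepE]
      split_ifs <;> rfl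
    have hb := pv_byte (k+1)
    rw [hseed, ih (k+1)]
    push_cast at hb ⊢
    simp only [List.append_assoc, List.singleton_append, hb]

-- ===== VERDICT (by name: the statement is the Claim_ definition above) =====
theorem op_keystream_xor_spec : Claim_equal_op_keystream_xor := by
  intro text encrypt _
  unfold Spec_op_keystream_xor
  show op_keystream_xor text encrypt = _
  simp only [op_keystream_xor, op_keystream_xor_alt]
  rw [show (86247931 : Nat) = pvE 0 % 2147483648 from by decide]
  rw [show (0 : Int) = ((0 : Nat) : Int) from rfl]
  rw [pv_main text.toList 0 [], List.nil_append]
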